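-- pv_equiv track=rewrite | github.com/ewail/FreeMat | tools/retfilter.py | refilter
-- ===== SOURCE A (Python) =====
-- def refilter(txt):
--     ret = ''
--     ineqn = False
--     protect = ['^','_','&','|']
--     while (txt):
--         c = txt[0]
--         txt = txt[1:]
--         if (c == '$'):
--             ineqn = not ineqn
--         if ((c in protect) and not ineqn):
--             ret += '\\'
--         ret += c
--     return ret
-- ===== SOURCE B (Python) =====
-- def refilter(txt):
--     segs = txt.split('$')
--     return '$'.join(
--         ''.join('\\' + c if c in '^_&|' else c for c in seg) if i % 2 == 0 else seg
--         for i, seg in enumerate(segs))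
-- ===== Notes on version B (the rewrite author's own statement) =====
-- stated objective: simpler
-- what changed: Replaced A's char-by-char loop (with repeated string slicing/concat and an ineqn boolean) by splitting on the dollar delimiter into alternating regions, escaping protect chars only in even-indexed non-math segments, and rejoining.
import Mathlib
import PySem

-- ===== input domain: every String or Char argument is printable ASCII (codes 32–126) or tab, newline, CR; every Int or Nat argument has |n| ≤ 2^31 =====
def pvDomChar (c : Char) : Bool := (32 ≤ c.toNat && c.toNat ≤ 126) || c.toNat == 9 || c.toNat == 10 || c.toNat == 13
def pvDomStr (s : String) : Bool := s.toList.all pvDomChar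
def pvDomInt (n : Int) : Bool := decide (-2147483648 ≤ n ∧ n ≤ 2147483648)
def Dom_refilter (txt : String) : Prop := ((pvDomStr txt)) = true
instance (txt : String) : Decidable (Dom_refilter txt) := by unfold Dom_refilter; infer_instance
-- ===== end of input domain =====

-- B replaces A's char-by-char math-mode state machine with a split-on-'$' /
-- escape-even-segments / rejoin pass (objective: simpler; return value only, no speed claim).

-- ===== PORT A =====
-- A's while-loop: consume one char, toggle ineqn on '$', maybe emit '\', emit c.
def refilterGo : List Char → List Char → Bool → List Char
  | [], ret, _ => ret
  | c :: rest, ret, ineqn =>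
    let ineqn' := if c == '$' then !ineqn else ineqn
    let ret' := if (['^','_','&','|'].contains c) && !ineqn' then ret ++ ['\\'] else ret
    refilterGo rest (ret' ++ [c]) ineqn'

def refilter (txt : String) : String :=
  String.mk (refilterGo txt.toList [] false)

-- ===== PORT B =====
-- escape one non-math segment: '\\' + c for each protect char (the inner ''.join in Source B)
def escSeg (seg : List Char) : List Char :=
  seg.flatMap (fun c => if ['^','_','&','|'].contains c then ['\\', c] else [c])

def refilter_alt (txt : String) : String :=
  String.mk (PySem.Chars.join ['$']
    ((PySem.List.enumerate (PySem.Chars.splitOn txt.toList ['$'])).map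
      (fun p => if p.1 % 2 == 0 then escSeg p.2 else p.2)))

-- ===== PRECONDITION & SPEC =====
def Spec_refilter (txt : String) (out : String) : Prop := out = refilter_alt txt
instance (txt : String) (out : String) : Decidable (Spec_refilter txt out) := by unfold Spec_refilter; infer_instance

-- ===== CLAIM (what is proved, stated in full; the proofs are below) =====
def Claim_equal_refilter : Prop := ∀ (txt : String), Dom_refilter txt → Spec_refilter txt (refilter txt)

-- ===== LEMMAS AND PROOFS =====

-- direct (accumulator-free) form of A's loop
def fA (b : Bool) : List Char → List Char
  | [] => []
  | c :: rest =>
    let b' := if c == '$' then !b else b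
    (if (['^','_','&','|'].contains c) && !b' then ['\\', c] else [c]) ++ fA b' rest

theorem refilterGo_eq (l : List Char) : ∀ (ret : List Char) (b : Bool),
    refilterGo l ret b = ret ++ fA b l := by
  induction l with
  | nil => intro ret b; simp [refilterGo, fA]
  | cons c rest ih =>
    intro ret b
    simp only [refilterGo, fA]
    split_ifs <;> simp [ih]

-- simple structural split on one char
def sc (d : Char) : List Char → List (List Char)
  | [] => [[]]
  | c :: rest =>
    if c == d then [] :: sc d rest
    else (c :: (sc d rest).headI) :: (sc d rest).tail

theorem sc_ne_nil (d : Char) (l : List Char) : sc d l ≠ [] := by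
  cases l with
  | nil => simp [sc]
  | cons c rest => simp only [sc]; split_ifs <;> simp

theorem splitOn_go_eq (d : Char) : ∀ (fuel : Nat) (l cur : List Char) (acc : List (List Char)),
    l.length < fuel →
    PySem.Chars.splitOn.go [d] fuel l cur acc =
      acc.reverse ++ (cur.reverse ++ (sc d l).headI) :: (sc d l).tail := by
  intro fuel
  induction fuel with
  | zero => intro l cur acc h; omega
  | succ fuel ih =>
    intro l cur acc h
    cases l with
    | nil => simp [PySem.Chars.splitOn.go, sc]
    | cons c rest =>
      have hr : rest.length < fuel := by simpa using Nat.lt_of_succ_lt_succ h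
      by_cases hc : c = d
      · subst hc
        have hpre : List.isPrefixOf [c] (c :: rest) = true := by
          simp [List.isPrefixOf]
        simp only [PySem.Chars.splitOn.go, hpre, if_true]
        rw [show List.drop (List.length [c]) (c :: rest) = rest by simp]
        rw [ih rest [] (cur.reverse :: acc) hr]
        obtain ⟨s, ss, hss⟩ : ∃ s ss, sc c rest = s :: ss := by
          cases h' : sc c rest with
          | nil => exact absurd h' (sc_ne_nil c rest)
          | cons s ss => exact ⟨s, ss, rfl⟩
        simp [sc, hss]
      · have hpre : List.isPrefixOf [d] (c :: rest) = false := by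
          simp [List.isPrefixOf]
          exact fun h' => absurd h'.symm hc
        simp only [PySem.Chars.splitOn.go, hpre]
        rw [if_neg (by simp)]
        rw [ih rest (c :: cur) acc hr]
        have hcd : (c == d) = false := by simp [hc]
        simp [sc, hcd]

theorem splitOn_eq_sc (d : Char) (l : List Char) :
    PySem.Chars.splitOn l [d] = sc d l := by
  unfold PySem.Chars.splitOn
  rw [splitOn_go_eq d (l.length + 1) l [] [] (by omega)]
  obtain ⟨s, ss, hss⟩ : ∃ s ss, sc d l = s :: ss := by
    cases h' : sc d l with
    | nil => exact absurd h' (sc_ne_nil d l)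
    | cons s ss => exact ⟨s, ss, rfl⟩
  simp [hss]

-- alternate join: escape the head segment iff b = false (outside math), flip at each '$'
def altJoin (b : Bool) : List (List Char) → List Char
  | [] => []
  | s :: ss =>
    (if b then s else escSeg s) ++
      match ss with
      | [] => []
      | _ :: _ => '$' :: altJoin (!b) ss

def ajTail (b : Bool) : List (List Char) → List Char
  | [] => []
  | ss@(_ :: _) => '$' :: altJoin b ss

theorem altJoin_cons_eq (b : Bool) (s : List Char) (ss : List (List Char)) :
    altJoin b (s :: ss) = (if b then s else escSeg s) ++ ajTail (!b) ss := by
  cases ss <;> rfl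

theorem altJoin_eq_fA : ∀ (l : List Char) (b : Bool),
    altJoin b (sc '$' l) = fA b l := by
  intro l
  induction l with
  | nil => intro b; cases b <;> simp [sc, altJoin, fA, escSeg]
  | cons c rest ih =>
    intro b
    obtain ⟨s, ss, hss⟩ : ∃ s ss, sc '$' rest = s :: ss := by
      cases h' : sc '$' rest with
      | nil => exact absurd h' (sc_ne_nil '$' rest)
      | cons s ss => exact ⟨s, ss, rfl⟩
    have ih' := ih b
    rw [hss, altJoin_cons_eq] at ih'
    by_cases hc : c = '$'
    · subst hc
      have hsc : sc '$' ('$' :: rest) = [] :: s :: ss := by simp [sc, hss]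
      rw [hsc, altJoin_cons_eq, show ajTail (!b) (s :: ss) = '$' :: altJoin (!b) (s :: ss) from rfl,
        ← hss, ih]
      cases b <;> simp [fA, escSeg]
    · have hcd : (c == '$') = false := by simp [hc]
      have hsc : sc '$' (c :: rest) = (c :: s) :: ss := by simp [sc, hcd, hss]
      rw [hsc, altJoin_cons_eq]
      cases b with
      | true =>
        simp only [if_true] at ih' ⊢
        simp [fA, hcd, ← ih']
      | false =>
        simp only [Bool.false_eq_true, if_false] at ih' ⊢
        have he : escSeg (c :: s) =
            (if (['^','_','&','|'].contains c) then ['\\', c] else [c]) ++ escSeg s := by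
          simp [escSeg]
        rw [he]
        simp [fA, hcd, ← ih', List.append_assoc]

theorem join_enum_eq_altJoin : ∀ (segs : List (List Char)) (n : Int) (b : Bool),
    (n % 2 == 0) = !b →
    PySem.Chars.join ['$']
      ((PySem.List.enumerate segs n).map (fun p => if p.1 % 2 == 0 then escSeg p.2 else p.2)) =
    altJoin b segs := by
  intro segs
  induction segs with
  | nil => intro n b _; simp [PySem.List.enumerate, PySem.Chars.join_nil, altJoin]
  | cons s ss ih =>
    intro n b hn
    have hstep : ((n + 1) % 2 == 0) = !(!b) := by
      cases b <;> simp_all <;> omega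
    cases ss with
    | nil =>
      simp only [PySem.List.enumerate, List.map, PySem.Chars.join_singleton, altJoin, hn]
      cases b <;> simp_all
    | cons t ts =>
      have := ih (n + 1) (!b) hstep
      simp only [PySem.List.enumerate, List.map] at this ⊢
      rw [PySem.Chars.join_cons_cons, this]
      show _ = altJoin b (s :: t :: ts)
      have : altJoin b (s :: t :: ts) = (if b then s else escSeg s) ++ '$' :: altJoin (!b) (t :: ts) := rfl
      rw [this, hn]
      cases b <;> simp

-- ===== VERDICT (by name: the statement is the Claim_ definition above) =====
theorem refilter_spec : Claim_equal_refilter := by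
  intro txt _
  unfold Spec_refilter refilter refilter_alt
  rw [refilterGo_eq, List.nil_append, splitOn_eq_sc,
    join_enum_eq_altJoin (sc '$' txt.toList) 0 false (by simp),
    altJoin_eq_fA]
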